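-- pv_equiv track=rewrite | github.com/owhygithub/AML-fraud-detector | functions.py | count_unused_decimals
-- ===== SOURCE A (Python) =====
-- def count_unused_decimals(number):
--     # Convert number to string to iterate through digits
--     num_str = str(number)
--     count = 0
--
--     # Iterate through digits from the end
--     for digit in reversed(num_str):
--         # If the digit is '0', increment count
--         if digit == '0':
--             count += 1
--         # If non-zero digit encountered, break the loop
--         else:
--             break
--
--     # Remove trailing zeroes from the number
--     num_str = num_str.rstrip('0')
--
--     return num_str, count
-- ===== SOURCE B (Python) =====
-- def count_unused_decimals(number):
--     num_str = str(number)
--     stripped = num_str.rstrip('0')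
--     return stripped, len(num_str) - len(stripped)
-- ===== Notes on version B (the rewrite author's own statement) =====
-- stated objective: simpler
-- what changed: B drops A's explicit reverse-iteration counting loop and derives the trailing-zero count arithmetically as the length difference before and after rstrip('0').
import Mathlib
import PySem

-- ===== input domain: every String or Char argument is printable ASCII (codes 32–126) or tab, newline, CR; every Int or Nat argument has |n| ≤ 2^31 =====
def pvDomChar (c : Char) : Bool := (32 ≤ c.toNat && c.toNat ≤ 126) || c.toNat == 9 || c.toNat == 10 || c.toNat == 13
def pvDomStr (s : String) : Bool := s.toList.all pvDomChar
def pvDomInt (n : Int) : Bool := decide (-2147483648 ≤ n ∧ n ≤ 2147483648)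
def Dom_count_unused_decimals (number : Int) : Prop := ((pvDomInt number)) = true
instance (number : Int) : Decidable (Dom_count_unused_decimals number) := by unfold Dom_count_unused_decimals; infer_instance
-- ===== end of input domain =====

-- B replaces A's explicit reverse-iteration counting loop by the length difference
-- before and after rstrip('0'); return values are identical (objective: simpler).

-- s.rstrip('0') on a list of chars (exact: drop trailing '0' characters)
def pvRstrip0 (cs : List Char) : List Char := (cs.reverse.dropWhile (· == '0')).reverse

-- ===== PORT A =====
-- A's loop: iterate digits from the end, count '0's, break at first non-zero
def pvTrailLoop : List Char → Int → Int
  | [], count => count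
  | d :: rest, count => if d == '0' then pvTrailLoop rest (count + 1) else count

def count_unused_decimals (number : Int) : String × Int :=
  let numStr := PySem.Int.toStr number
  let count := pvTrailLoop numStr.toList.reverse 0
  (String.ofList (pvRstrip0 numStr.toList), count)

-- ===== PORT B =====
def count_unused_decimals_alt (number : Int) : String × Int :=
  let numStr := PySem.Int.toStr number
  let stripped := pvRstrip0 numStr.toList
  (String.ofList stripped, (numStr.toList.length : Int) - (stripped.length : Int))

-- ===== PRECONDITION & SPEC =====
def Spec_count_unused_decimals (number : Int) (out : String × Int) : Prop := out = count_unused_decimals_alt number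
instance (number : Int) (out : String × Int) : Decidable (Spec_count_unused_decimals number out) := by unfold Spec_count_unused_decimals; infer_instance

-- ===== CLAIM (what is proved, stated in full; the proofs are below) =====
def Claim_equal_count_unused_decimals : Prop := ∀ (number : Int), Dom_count_unused_decimals number → Spec_count_unused_decimals number (count_unused_decimals number)

-- ===== LEMMAS AND PROOFS =====

theorem pvTrailLoop_eq (r : List Char) (c : Int) :
    pvTrailLoop r c = c + ((r.takeWhile (· == '0')).length : Int) := by
  induction r generalizing c with
  | nil => simp [pvTrailLoop]
  | cons d rest ih =>
    by_cases h : d = '0'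
    · simp [pvTrailLoop, h, ih]; ring
    · simp [pvTrailLoop, h]

theorem pvRstrip0_length (cs : List Char) :
    (pvRstrip0 cs).length = cs.length - (cs.reverse.takeWhile (· == '0')).length := by
  unfold pvRstrip0
  have h := List.takeWhile_append_dropWhile (p := (· == '0')) (l := cs.reverse)
  have hlen : (cs.reverse.takeWhile (· == '0')).length
      + (cs.reverse.dropWhile (· == '0')).length = cs.length := by
    have h2 := congrArg List.length h
    rw [List.length_append, List.length_reverse] at h2
    exact h2
  simp only [List.length_reverse]
  omega

theorem count_unused_decimals_spec : Claim_equal_count_unused_decimals := by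
  intro number _
  unfold Spec_count_unused_decimals count_unused_decimals count_unused_decimals_alt
  simp only
  refine Prod.ext rfl ?_
  rw [pvTrailLoop_eq, pvRstrip0_length]
  have hle : ((PySem.Int.toStr number).toList.reverse.takeWhile (· == '0')).length
      ≤ (PySem.Int.toStr number).toList.length := by
    simpa using (List.takeWhile_prefix (l := (PySem.Int.toStr number).toList.reverse)
      (p := (· == '0'))).length_le
  simp only
  omega
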